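-- pv_equiv track=rewrite | github.com/Nika-Kevlishvili/cursor-project | Cursor-Project/examples/update_phoenix_by_environment.py | categorize_branches
-- ===== SOURCE A (Python) =====
-- from typing import Dict, List, Any
--
-- def categorize_branches(branches: List[str]) -> Dict[str, List[str]]:
--     """
--     კატეგორიზაცია ბრენჩების გარემოების მიხედვით.
--
--     Args:
--         branches: ბრენჩების სია
--
--     Returns:
--         Dictionary გარემოების მიხედვით
--     """
--     categorized = {
--         'dev': [],
--         'test': [],
--         'prod': [],
--         'release': [],
--         'feature': []
--     }
--
--     for branch in branches:
--         branch_lower = branch.lower()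
--
--         if branch_lower == 'dev':
--             categorized['dev'].append(branch)
--         elif branch_lower == 'test':
--             categorized['test'].append(branch)
--         elif branch_lower in ['main', 'master']:
--             categorized['prod'].append(branch)
--         elif branch_lower.startswith('release/'):
--             categorized['release'].append(branch)
--         elif branch_lower.startswith('feature/'):
--             categorized['feature'].append(branch)
--
--     return categorized
-- ===== SOURCE B (Python) =====
-- from typing import Dict, List
--
-- def categorize_branches(branches: List[str]) -> Dict[str, List[str]]:
--     """Same categorization, built as five independent filtered passes.
--     The predicates are mutually exclusive, so buckets match A's single pass."""
--     return {
--         'dev': [b for b in branches if b.lower() == 'dev'],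
--         'test': [b for b in branches if b.lower() == 'test'],
--         'prod': [b for b in branches if b.lower() in ('main', 'master')],
--         'release': [b for b in branches if b.lower().startswith('release/')],
--         'feature': [b for b in branches if b.lower().startswith('feature/')],
--     }
-- ===== Notes on version B (the rewrite author's own statement) =====
-- stated objective: idiomatic
-- what changed: Replaces A's single classifying loop that mutates five dict buckets with a dict literal of five independent list comprehensions, each filtering the input once with its own predicate (valid because the predicates are mutually exclusive).
import Mathlib
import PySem

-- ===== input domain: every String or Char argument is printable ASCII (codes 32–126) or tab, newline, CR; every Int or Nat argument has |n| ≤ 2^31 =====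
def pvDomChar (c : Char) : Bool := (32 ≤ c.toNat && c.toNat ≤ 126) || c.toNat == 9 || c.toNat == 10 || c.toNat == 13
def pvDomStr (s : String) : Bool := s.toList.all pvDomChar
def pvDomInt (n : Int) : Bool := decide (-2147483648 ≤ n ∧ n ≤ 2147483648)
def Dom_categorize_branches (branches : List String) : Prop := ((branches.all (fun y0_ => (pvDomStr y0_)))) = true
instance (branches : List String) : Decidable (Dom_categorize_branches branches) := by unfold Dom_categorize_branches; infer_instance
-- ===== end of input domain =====

-- B replaces A's single classifying loop over a mutable five-bucket dict with five
-- independent filtered passes (one list comprehension per bucket); same cost, more idiomatic.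


-- ===== PORT A =====
-- loop body of A, named so the invariant lemma below can speak about it
def catStep (categorized : PySem.Dict String (List String)) (branch : String) : PySem.Dict String (List String) :=
  let branch_lower := PySem.Str.lower branch
  if branch_lower == "dev" then
    categorized.modify "dev" [] (fun l => l ++ [branch])
  else if branch_lower == "test" then
    categorized.modify "test" [] (fun l => l ++ [branch])
  else if ["main", "master"].contains branch_lower then
    categorized.modify "prod" [] (fun l => l ++ [branch])
  else if PySem.Str.startswith branch_lower "release/" then
    categorized.modify "release" [] (fun l => l ++ [branch])
  else if PySem.Str.startswith branch_lower "feature/" then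
    categorized.modify "feature" [] (fun l => l ++ [branch])
  else categorized

def categorize_branches (branches : List String) : List (String × List String) :=
  let categorized : PySem.Dict String (List String) :=
    PySem.Dict.ofList [("dev", []), ("test", []), ("prod", []), ("release", []), ("feature", [])]
  let categorized := branches.foldl catStep categorized
  categorized.items

-- ===== PORT B =====
def categorize_branches_alt (branches : List String) : List (String × List String) :=
  [("dev", branches.filter (fun b => PySem.Str.lower b == "dev")),
   ("test", branches.filter (fun b => PySem.Str.lower b == "test")),
   ("prod", branches.filter (fun b => ["main", "master"].contains (PySem.Str.lower b))),
   ("release", branches.filter (fun b => PySem.Str.startswith (PySem.Str.lower b) "release/")),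
   ("feature", branches.filter (fun b => PySem.Str.startswith (PySem.Str.lower b) "feature/"))]

-- ===== PRECONDITION & SPEC =====
def Spec_categorize_branches (branches : List String) (out : List (String × List String)) : Prop := out = categorize_branches_alt branches
instance (branches : List String) (out : List (String × List String)) : Decidable (Spec_categorize_branches branches out) := by unfold Spec_categorize_branches; infer_instance

-- ===== CLAIM (what is proved, stated in full; the proofs are below) =====
def Claim_equal_categorize_branches : Prop := ∀ (branches : List String), Dom_categorize_branches branches → Spec_categorize_branches branches (categorize_branches branches)

-- ===== LEMMAS AND PROOFS =====

-- A branch whose lowercased name starts with "release/" does not start with "feature/".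
theorem no_release_feature (l : String)
    (h : PySem.Str.startswith l "release/" = true) :
    PySem.Str.startswith l "feature/" = false := by
  by_contra hf
  rw [Bool.not_eq_false] at hf
  rw [PySem.Str.startswith_eq, PySem.Chars.startswith_iff] at h hf
  have h8 : ("release/".toList).length = ("feature/".toList).length := by decide
  have := (List.prefix_of_prefix_length_le h hf (le_of_eq h8)).eq_of_length h8
  exact absurd this (by decide)

-- Invariant of A's loop: starting from any five-bucket dict, the fold appends exactly
-- B's five filters to the corresponding buckets.
theorem fold_invariant (bs : List String) :
    ∀ (d t p r f : List String),
    (bs.foldl catStep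
      (PySem.Dict.mk [("dev", d), ("test", t), ("prod", p), ("release", r), ("feature", f)])).items
    = [("dev", d ++ bs.filter (fun b => PySem.Str.lower b == "dev")),
       ("test", t ++ bs.filter (fun b => PySem.Str.lower b == "test")),
       ("prod", p ++ bs.filter (fun b => ["main", "master"].contains (PySem.Str.lower b))),
       ("release", r ++ bs.filter (fun b => PySem.Str.startswith (PySem.Str.lower b) "release/")),
       ("feature", f ++ bs.filter (fun b => PySem.Str.startswith (PySem.Str.lower b) "feature/"))] := by
  induction bs with
  | nil => intro d t p r f; simp
  | cons b bs ih =>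
    intro d t p r f
    rw [List.foldl_cons]
    by_cases h1 : (PySem.Str.lower b == "dev") = true
    all_goals try simp only [Bool.not_eq_true] at h1
    · have hb : PySem.Str.lower b = "dev" := by simpa using h1
      have hstep : catStep (PySem.Dict.mk [("dev", d), ("test", t), ("prod", p), ("release", r), ("feature", f)]) b
          = PySem.Dict.mk [("dev", d ++ [b]), ("test", t), ("prod", p), ("release", r), ("feature", f)] := by
        simp only [catStep, h1]; rfl
      rw [hstep, ih]
      have h2 : (PySem.Str.lower b == "test") = false := by rw [hb]; decide
      have h3 : (["main", "master"].contains (PySem.Str.lower b)) = false := by rw [hb]; decide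
      have h4 : PySem.Str.startswith (PySem.Str.lower b) "release/" = false := by rw [hb]; decide
      have h5 : PySem.Str.startswith (PySem.Str.lower b) "feature/" = false := by rw [hb]; decide
      simp only [List.filter_cons, h1, h2, h3, h4, h5]
      simp
    · by_cases h2 : (PySem.Str.lower b == "test") = true
      all_goals try simp only [Bool.not_eq_true] at h2
      · have hb : PySem.Str.lower b = "test" := by simpa using h2
        have hstep : catStep (PySem.Dict.mk [("dev", d), ("test", t), ("prod", p), ("release", r), ("feature", f)]) b
            = PySem.Dict.mk [("dev", d), ("test", t ++ [b]), ("prod", p), ("release", r), ("feature", f)] := by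
          simp only [catStep, h1, h2]; rfl
        rw [hstep, ih]
        have h3 : (["main", "master"].contains (PySem.Str.lower b)) = false := by rw [hb]; decide
        have h4 : PySem.Str.startswith (PySem.Str.lower b) "release/" = false := by rw [hb]; decide
        have h5 : PySem.Str.startswith (PySem.Str.lower b) "feature/" = false := by rw [hb]; decide
        simp only [List.filter_cons, h1, h2, h3, h4, h5]
        simp
      · by_cases h3 : (["main", "master"].contains (PySem.Str.lower b)) = true
        all_goals try simp only [Bool.not_eq_true] at h3
        · have hstep : catStep (PySem.Dict.mk [("dev", d), ("test", t), ("prod", p), ("release", r), ("feature", f)]) b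
              = PySem.Dict.mk [("dev", d), ("test", t), ("prod", p ++ [b]), ("release", r), ("feature", f)] := by
            simp only [catStep, h1, h2, h3]; rfl
          rw [hstep, ih]
          have hb : PySem.Str.lower b = "main" ∨ PySem.Str.lower b = "master" := by
            have hb' := h3
            simp only [List.contains_cons, List.contains_nil, Bool.or_false,
              Bool.or_eq_true, beq_iff_eq] at hb'
            exact hb'
          have h4 : PySem.Str.startswith (PySem.Str.lower b) "release/" = false := by
            rcases hb with hb | hb <;> rw [hb] <;> decide
          have h5 : PySem.Str.startswith (PySem.Str.lower b) "feature/" = false := by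
            rcases hb with hb | hb <;> rw [hb] <;> decide
          simp only [List.filter_cons, h1, h2, h3, h4, h5]
          simp
        · by_cases h4 : PySem.Str.startswith (PySem.Str.lower b) "release/" = true
          all_goals try simp only [Bool.not_eq_true] at h4
          · have hstep : catStep (PySem.Dict.mk [("dev", d), ("test", t), ("prod", p), ("release", r), ("feature", f)]) b
                = PySem.Dict.mk [("dev", d), ("test", t), ("prod", p), ("release", r ++ [b]), ("feature", f)] := by
              simp only [catStep, h1, h2, h3, h4]; rfl
            rw [hstep, ih]
            have h5 := no_release_feature _ h4
            simp only [List.filter_cons, h1, h2, h3, h4, h5]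
            simp
          · by_cases h5 : PySem.Str.startswith (PySem.Str.lower b) "feature/" = true
            all_goals try simp only [Bool.not_eq_true] at h5
            · have hstep : catStep (PySem.Dict.mk [("dev", d), ("test", t), ("prod", p), ("release", r), ("feature", f)]) b
                  = PySem.Dict.mk [("dev", d), ("test", t), ("prod", p), ("release", r), ("feature", f ++ [b])] := by
                simp only [catStep, h1, h2, h3, h4, h5]; rfl
              rw [hstep, ih]
              simp only [List.filter_cons, h1, h2, h3, h4, h5]
              simp
            · have hstep : catStep (PySem.Dict.mk [("dev", d), ("test", t), ("prod", p), ("release", r), ("feature", f)]) b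
                  = PySem.Dict.mk [("dev", d), ("test", t), ("prod", p), ("release", r), ("feature", f)] := by
                simp only [catStep, h1, h2, h3, h4, h5]; rfl
              rw [hstep, ih]
              simp only [List.filter_cons, h1, h2, h3, h4, h5]
              simp

-- ===== VERDICT (by name: the statement is the Claim_ definition above) =====
theorem categorize_branches_spec : Claim_equal_categorize_branches := by
  intro branches _
  show categorize_branches branches = categorize_branches_alt branches
  unfold categorize_branches categorize_branches_alt
  simpa using fold_invariant branches [] [] [] [] []
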